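-- pv_equiv track=rewrite | github.com/nhl0000l/LongNH | max_coin_taken.py | maxCoin
-- ===== SOURCE A (Python) =====
-- def maxCoin(piles):
--     n = len(piles)
--     i = 0
--     maxArr = []
--     minArr = []
--     result = []
--     while i < n // 3:
--         maxArr.append(max(piles))
--         piles.remove(max(piles))
--         minArr.append(min(piles))
--         piles.remove(min(piles))
--         result.append(max(piles))
--         piles.remove(max(piles))
--         i += 1
--     return result
-- ===== SOURCE B (Python) =====
-- def maxCoin(piles):
--     s = sorted(piles)
--     n = len(s)
--     return [s[n - 2 - 2 * i] for i in range(n // 3)]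
-- ===== Notes on version B (the rewrite author's own statement) =====
-- stated objective: faster
-- what changed: Replaces A's repeated max/min scans with three list.remove calls per round by a single sort followed by reading the second-largest element of each triple (indices n-2, n-4, ...) directly; B also does not mutate the input list (A empties most of it in place).
import Mathlib
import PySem

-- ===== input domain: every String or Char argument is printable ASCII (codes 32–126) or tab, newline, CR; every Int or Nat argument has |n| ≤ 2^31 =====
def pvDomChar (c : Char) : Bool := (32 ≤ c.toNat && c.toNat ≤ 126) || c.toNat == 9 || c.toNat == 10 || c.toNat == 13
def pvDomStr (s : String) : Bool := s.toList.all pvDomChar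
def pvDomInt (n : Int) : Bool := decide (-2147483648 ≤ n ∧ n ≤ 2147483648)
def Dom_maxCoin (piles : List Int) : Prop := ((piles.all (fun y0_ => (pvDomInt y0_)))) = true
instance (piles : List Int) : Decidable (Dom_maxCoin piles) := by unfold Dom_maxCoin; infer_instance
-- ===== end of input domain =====

-- B sorts once and reads the second-largest of each triple from the sorted list (O(n log n) vs A's
-- repeated max/min scans, O(n^2)); A mutates its argument in place, B does not — the equivalence
-- proved here is about the return value only.


-- ===== PORT A =====
-- The while loop, one recursive step per iteration; the three `none` branches are unreachable
-- (Python's max/min on an empty list would raise, but the loop bound n//3 guarantees ≥ 3 elements).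
def maxCoinLoop : Nat → List Int → List Int → List Int → List Int → List Int
  | 0, _, _, _, result => result
  | fuel+1, piles, maxArr, minArr, result =>
    match PySem.List.max? piles (fun x => x) with
    | none => result
    | some mx =>
      let piles1 := (PySem.List.remove? piles mx).getD []
      match PySem.List.min? piles1 (fun x => x) with
      | none => result
      | some mn =>
        let piles2 := (PySem.List.remove? piles1 mn).getD []
        match PySem.List.max? piles2 (fun x => x) with
        | none => result
        | some mx2 =>
          maxCoinLoop fuel ((PySem.List.remove? piles2 mx2).getD [])
            (maxArr ++ [mx]) (minArr ++ [mn]) (result ++ [mx2])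

def maxCoin (piles : List Int) : List Int :=
  maxCoinLoop (piles.length / 3) piles [] [] []

-- ===== PORT B =====
def maxCoin_alt (piles : List Int) : List Int :=
  let s := PySem.List.sorted piles (fun x => x) false
  let n := s.length
  (PySem.List.pyRange 0 ((n : Int) / 3) 1).map
    (fun i => PySem.List.pyGetD s ((n : Int) - 2 - 2 * i) 0)

-- ===== PRECONDITION & SPEC =====
def Spec_maxCoin (piles : List Int) (out : List Int) : Prop := out = maxCoin_alt piles
instance (piles : List Int) (out : List Int) : Decidable (Spec_maxCoin piles out) := by unfold Spec_maxCoin; infer_instance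

-- ===== CLAIM (what is proved, stated in full; the proofs are below) =====
def Claim_equal_maxCoin : Prop := ∀ (piles : List Int), Dom_maxCoin piles → Spec_maxCoin piles (maxCoin piles)

-- ===== LEMMAS AND PROOFS =====

theorem max?_id_perm (l1 l2 : List Int) (h : l1.Perm l2) :
    PySem.List.max? l1 (fun x => x) = PySem.List.max? l2 (fun x => x) := by
  cases h1 : PySem.List.max? l1 (fun x => x) with
  | none =>
      have e1 : l1 = [] := (PySem.List.max?_eq_none_iff l1 _).mp h1
      subst e1
      have e2 : l2 = [] := h.symm.eq_nil
      subst e2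
      exact ((PySem.List.max?_eq_none_iff [] _).mpr rfl).symm
  | some m1 =>
      cases h2 : PySem.List.max? l2 (fun x => x) with
      | none =>
          have e2 : l2 = [] := (PySem.List.max?_eq_none_iff l2 _).mp h2
          subst e2
          have e1 : l1 = [] := h.eq_nil
          subst e1
          rw [(PySem.List.max?_eq_none_iff [] _).mpr rfl] at h1
          exact absurd h1 (by simp)
      | some m2 =>
          have hm1 := PySem.List.max?_mem h1
          have hm2 := PySem.List.max?_mem h2
          have hle1 := PySem.List.max?_isMax h1 m2 (h.mem_iff.mpr hm2)
          have hle2 := PySem.List.max?_isMax h2 m1 (h.mem_iff.mp hm1)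
          simp_all [le_antisymm_iff]

theorem min?_id_perm (l1 l2 : List Int) (h : l1.Perm l2) :
    PySem.List.min? l1 (fun x => x) = PySem.List.min? l2 (fun x => x) := by
  cases h1 : PySem.List.min? l1 (fun x => x) with
  | none =>
      have e1 : l1 = [] := (PySem.List.min?_eq_none_iff l1 _).mp h1
      subst e1
      have e2 : l2 = [] := h.symm.eq_nil
      subst e2
      exact ((PySem.List.min?_eq_none_iff [] _).mpr rfl).symm
  | some m1 =>
      cases h2 : PySem.List.min? l2 (fun x => x) with
      | none =>
          have e2 : l2 = [] := (PySem.List.min?_eq_none_iff l2 _).mp h2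
          subst e2
          have e1 : l1 = [] := h.eq_nil
          subst e1
          rw [(PySem.List.min?_eq_none_iff [] _).mpr rfl] at h1
          exact absurd h1 (by simp)
      | some m2 =>
          have hm1 := PySem.List.min?_mem h1
          have hm2 := PySem.List.min?_mem h2
          have hle1 := PySem.List.min?_isMin h1 m2 (h.mem_iff.mpr hm2)
          have hle2 := PySem.List.min?_isMin h2 m1 (h.mem_iff.mp hm1)
          simp_all [le_antisymm_iff]

theorem remove?_getD_perm (l1 l2 : List Int) (v : Int) (h : l1.Perm l2) (hv : v ∈ l1) :
    ((PySem.List.remove? l1 v).getD []).Perm ((PySem.List.remove? l2 v).getD []) := by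
  rw [PySem.List.remove?_eq_some_erase _ _ hv, PySem.List.remove?_eq_some_erase _ _ (h.mem_iff.mp hv)]
  exact h.erase v

theorem loop_perm (f : Nat) (l1 l2 ma mi res : List Int) (h : l1.Perm l2) :
    maxCoinLoop f l1 ma mi res = maxCoinLoop f l2 ma mi res := by
  induction f generalizing l1 l2 ma mi res with
  | zero => rfl
  | succ f ih =>
      rw [maxCoinLoop, maxCoinLoop, max?_id_perm l1 l2 h]
      cases hmx : PySem.List.max? l2 (fun x => x) with
      | none => rfl
      | some mx =>
          dsimp only
          have hmem1 : mx ∈ l1 := h.mem_iff.mpr (PySem.List.max?_mem hmx)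
          have hp1 := remove?_getD_perm l1 l2 mx h hmem1
          rw [min?_id_perm _ _ hp1]
          cases hmn : PySem.List.min? ((PySem.List.remove? l2 mx).getD []) (fun x => x) with
          | none => rfl
          | some mn =>
              dsimp only
              have hmem2 : mn ∈ (PySem.List.remove? l1 mx).getD [] :=
                hp1.mem_iff.mpr (PySem.List.min?_mem hmn)
              have hp2 := remove?_getD_perm _ _ mn hp1 hmem2
              rw [max?_id_perm _ _ hp2]
              cases hmx2 : PySem.List.max? ((PySem.List.remove? ((PySem.List.remove? l2 mx).getD []) mn).getD []) (fun x => x) with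
              | none => rfl
              | some mx2 =>
                  dsimp only
                  have hmem3 : mx2 ∈ (PySem.List.remove? ((PySem.List.remove? l1 mx).getD []) mn).getD [] :=
                    hp2.mem_iff.mpr (PySem.List.max?_mem hmx2)
                  exact ih _ _ _ _ _ (remove?_getD_perm _ _ mx2 hp2 hmem3)

theorem pairwise_le_getElem (s : List Int) (hs : s.Pairwise (· ≤ ·)) (i j : Nat)
    (hij : i ≤ j) (hj : j < s.length) : s[i]'(by omega) ≤ s[j] := by
  rcases Nat.lt_or_ge i j with hlt | hge
  · exact (List.pairwise_iff_getElem.mp hs) i j (by omega) hj hlt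
  · have : i = j := by omega
    subst this; rfl

theorem max?_sorted (s : List Int) (hs : s.Pairwise (· ≤ ·)) (hne : 0 < s.length) :
    PySem.List.max? s (fun x => x) = some (s[s.length - 1]'(by omega)) := by
  cases h : PySem.List.max? s (fun x => x) with
  | none =>
      rw [PySem.List.max?_eq_none_iff] at h
      simp [h] at hne
  | some m =>
      have hm := PySem.List.max?_mem h
      obtain ⟨i, hi, rfl⟩ := List.mem_iff_getElem.mp hm
      have h1 : s[i] ≤ s[s.length - 1]'(by omega) := pairwise_le_getElem s hs i _ (by omega) (by omega)
      have h2 := PySem.List.max?_isMax h (s[s.length - 1]'(by omega)) (s.getElem_mem _)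
      simp at h2 ⊢
      omega

theorem min?_sorted (s : List Int) (hs : s.Pairwise (· ≤ ·)) (hne : 0 < s.length) :
    PySem.List.min? s (fun x => x) = some (s[0]'hne) := by
  cases h : PySem.List.min? s (fun x => x) with
  | none =>
      rw [PySem.List.min?_eq_none_iff] at h
      simp [h] at hne
  | some m =>
      have hm := PySem.List.min?_mem h
      obtain ⟨i, hi, rfl⟩ := List.mem_iff_getElem.mp hm
      have h1 : s[0]'hne ≤ s[i] := pairwise_le_getElem s hs 0 i (by omega) hi
      have h2 := PySem.List.min?_isMin h (s[0]'hne) (s.getElem_mem _)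
      simp at h2 ⊢
      omega

theorem erase_append_singleton_perm (l : List Int) (a : Int) :
    ((l ++ [a]).erase a).Perm l := by
  by_cases h : a ∈ l
  · rw [List.erase_append_left _ h]
    exact (List.perm_append_singleton a _).trans (List.perm_cons_erase h).symm
  · rw [List.erase_append_right _ h]
    simp

theorem erase_last_perm (s : List Int) (hne : 0 < s.length) :
    (s.erase (s[s.length - 1]'(by omega))).Perm s.dropLast := by
  have hnil : s ≠ [] := List.ne_nil_of_length_pos hne
  have hlast : s[s.length - 1]'(by omega) = s.getLast hnil := by
    rw [List.getLast_eq_getElem]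
  have key := erase_append_singleton_perm s.dropLast (s.getLast hnil)
  rw [List.dropLast_append_getLast hnil] at key
  rw [hlast]
  exact key

theorem erase_head_eq (s : List Int) (hne : 0 < s.length) :
    s.erase (s[0]'hne) = s.tail := by
  cases s with
  | nil => simp at hne
  | cons a t => simp

-- one canonical round on a sorted list
theorem loop_round (f : Nat) (s ma mi res : List Int) (hs : s.Pairwise (· ≤ ·))
    (h3 : 3 ≤ s.length) :
    maxCoinLoop (f+1) s ma mi res =
      maxCoinLoop f (s.dropLast.tail.dropLast)
        (ma ++ [s[s.length - 1]'(by omega)]) (mi ++ [s[0]'(by omega)])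
        (res ++ [s[s.length - 2]'(by omega)]) := by
  have hdl : s.dropLast.Pairwise (· ≤ ·) := hs.sublist s.dropLast_sublist
  have hdlt : s.dropLast.tail.Pairwise (· ≤ ·) := hdl.sublist s.dropLast.tail_sublist
  have hlen : s.dropLast.length = s.length - 1 := s.length_dropLast
  have hlen2 : s.dropLast.tail.length = s.length - 2 := by simp [hlen]; omega
  rw [maxCoinLoop, max?_sorted s hs (by omega)]
  dsimp only
  have hmem1 : (s[s.length - 1]'(by omega)) ∈ s := s.getElem_mem _
  rw [PySem.List.remove?_eq_some_erase _ _ hmem1]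
  simp only [Option.getD_some]
  have hp1 : (s.erase (s[s.length - 1]'(by omega))).Perm s.dropLast := erase_last_perm s (by omega)
  rw [min?_id_perm _ _ hp1, min?_sorted s.dropLast hdl (by omega)]
  dsimp only
  have hd0 : s.dropLast[0]'(by omega) = s[0]'(by omega) := List.getElem_dropLast ..
  have hmem2 : (s.dropLast[0]'(by omega)) ∈ s.erase (s[s.length - 1]'(by omega)) :=
    hp1.mem_iff.mpr (s.dropLast.getElem_mem _)
  rw [PySem.List.remove?_eq_some_erase _ _ hmem2]
  simp only [Option.getD_some]
  have hp2 : ((s.erase (s[s.length - 1]'(by omega))).erase (s.dropLast[0]'(by omega))).Perm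
      s.dropLast.tail := by
    refine (hp1.erase _).trans ?_
    rw [erase_head_eq s.dropLast (by omega)]
  rw [max?_id_perm _ _ hp2, max?_sorted s.dropLast.tail hdlt (by omega)]
  dsimp only
  have hidx : s.dropLast.tail[s.dropLast.tail.length - 1]'(by omega) = s[s.length - 2]'(by omega) := by
    rw [List.getElem_tail, List.getElem_dropLast]
    congr 1
    omega
  have hmem3 : (s.dropLast.tail[s.dropLast.tail.length - 1]'(by omega)) ∈
      (s.erase (s[s.length - 1]'(by omega))).erase (s.dropLast[0]'(by omega)) :=
    hp2.mem_iff.mpr (s.dropLast.tail.getElem_mem _)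
  rw [PySem.List.remove?_eq_some_erase _ _ hmem3]
  simp only [Option.getD_some]
  rw [loop_perm _ _ (s.dropLast.tail.dropLast) _ _ _ (by
    refine (hp2.erase _).trans ?_
    have := erase_last_perm s.dropLast.tail (by omega)
    exact this)]
  rw [hd0, hidx]

theorem sorted_loop (f : Nat) (s ma mi res : List Int) (hs : s.Pairwise (· ≤ ·))
    (hf : 3 * f ≤ s.length) :
    maxCoinLoop f s ma mi res =
      res ++ (List.range f).map (fun i => s.getD (s.length - 2 - 2 * i) 0) := by
  induction f generalizing s ma mi res with
  | zero => simp [maxCoinLoop]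
  | succ f ih =>
      rw [loop_round f s ma mi res hs (by omega)]
      have hsub : List.Sublist s.dropLast.tail.dropLast s :=
        (s.dropLast.tail.dropLast_sublist.trans s.dropLast.tail_sublist).trans s.dropLast_sublist
      have hs' : s.dropLast.tail.dropLast.Pairwise (· ≤ ·) := hs.sublist hsub
      have hlen3 : s.dropLast.tail.dropLast.length = s.length - 3 := by
        simp
        omega
      rw [ih _ _ _ _ hs' (by omega)]
      rw [List.range_succ_eq_map, List.map_cons, List.map_map, List.append_assoc,
        List.singleton_append]
      refine congrArg (res ++ ·) ?_
      refine List.cons_eq_cons.mpr ⟨?_, ?_⟩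
      · rw [List.getD_eq_getElem?_getD,
          List.getElem?_eq_getElem (by omega : s.length - 2 - 2 * 0 < s.length)]
        simp only [Option.getD_some]
        simp
      · apply List.map_congr_left
        intro i hi
        rw [List.mem_range] at hi
        simp only [Function.comp]
        rw [hlen3]
        rw [List.getD_eq_getElem?_getD, List.getD_eq_getElem?_getD,
          List.getElem?_eq_getElem
            (by rw [hlen3]; omega : s.length - 3 - 2 - 2 * i < s.dropLast.tail.dropLast.length),
          List.getElem?_eq_getElem (by omega : s.length - 2 - 2 * (i + 1) < s.length)]
        simp only [Option.getD_some]
        rw [List.getElem_dropLast, List.getElem_tail, List.getElem_dropLast]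
        congr 1
        omega

-- ===== VERDICT (by name: the statement is the Claim_ definition above) =====
theorem maxCoin_spec : Claim_equal_maxCoin := by
  intro piles _
  unfold Spec_maxCoin maxCoin maxCoin_alt
  set s := PySem.List.sorted piles (fun x => x) false with hsdef
  have hperm : piles.Perm s := (PySem.List.sorted_perm ..).symm
  have hlen : s.length = piles.length := hperm.length_eq.symm
  have hsorted : s.Pairwise (· ≤ ·) := PySem.List.sorted_pairwise ..
  rw [loop_perm _ piles s [] [] [] hperm,
    sorted_loop (piles.length / 3) s [] [] [] hsorted (by omega)]
  simp only [List.nil_append]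
  rw [PySem.List.pyRange_one]
  rw [List.map_map]
  have hcast : ((s.length : Int) / 3 - 0).toNat = piles.length / 3 := by
    rw [hlen]; omega
  rw [hcast]
  apply List.map_congr_left
  intro i hi
  rw [List.mem_range] at hi
  simp only [Function.comp]
  have h0 : (0 : Int) + (i : Int) = (i : Int) := by ring
  rw [h0]
  have hival : (s.length : Int) - 2 - 2 * (i : Int) = ((s.length - 2 - 2 * i : Nat) : Int) := by
    rw [hlen]; omega
  rw [hival, PySem.List.pyGetD_natCast]
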